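-- pv_equiv track=rewrite | github.com/Raccoonrider/RS485_display_test | strFit.py | strFit_4x20
-- ===== SOURCE A (Python) =====
-- def strFit_4x20 (in_str:str):
--     s = 0 #Счетчик символов в текущей строке
--     l = 0 #Счетчик строк
--     i = 0 #Счетчик символов в in_str
--     out_str = ''
--
--     for symbol in in_str:
--         if l <=3:
--             if s <= 19 and symbol != '\n': #Запись при отсутствии переполнения
--                 out_str += in_str[i]
--                 s += 1
--             i += 1
--             if symbol == '\n': #Признак конца строки по символу перехода
--                 while s <= 19:  #Заполняем пробелами оставшееся место
--                     out_str += ' '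
--                     s += 1
--                 s = 0
--                 l += 1
--     while len(out_str)<80:
--         out_str += ' '
--
--     return out_str
-- ===== SOURCE B (Python) =====
-- def strFit_4x20(in_str: str):
--     return ''.join(seg[:20].ljust(20) for seg in in_str.split('\n')[:4]).ljust(80)
-- ===== Notes on version B (the rewrite author's own statement) =====
-- stated objective: simpler
-- what changed: Replaced A's per-character state machine (column/line/index counters with inner padding while-loops) by split(' '), truncating/padding each of the first 4 lines to 20 columns and padding the join to 80.
import Mathlib
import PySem

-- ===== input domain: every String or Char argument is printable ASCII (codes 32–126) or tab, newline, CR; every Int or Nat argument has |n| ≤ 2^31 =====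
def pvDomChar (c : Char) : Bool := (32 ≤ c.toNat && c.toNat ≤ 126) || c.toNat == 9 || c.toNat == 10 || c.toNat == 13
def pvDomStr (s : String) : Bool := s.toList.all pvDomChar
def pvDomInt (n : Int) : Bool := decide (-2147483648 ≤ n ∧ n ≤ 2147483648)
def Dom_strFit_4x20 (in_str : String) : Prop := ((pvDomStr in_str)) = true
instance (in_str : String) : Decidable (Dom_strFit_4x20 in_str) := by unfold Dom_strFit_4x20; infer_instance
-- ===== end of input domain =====

-- B replaces A's per-character column/line counter state machine by split('\n') + per-line truncate/pad (simpler).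


-- ===== PORT A =====
-- inner `while s <= 19: out_str += ' '; s += 1` of A
def pvPadLine (s : Int) (out : List Char) : Int × List Char :=
  if _h : s ≤ 19 then pvPadLine (s + 1) (out ++ [' ']) else (s, out)
  termination_by (20 - s).toNat
  decreasing_by omega

-- final `while len(out_str) < 80: out_str += ' '` of A
def pvPadTo80 (out : List Char) : List Char :=
  if _h : out.length < 80 then pvPadTo80 (out ++ [' ']) else out
  termination_by 80 - out.length
  decreasing_by simp only [List.length_append, List.length_cons, List.length_nil]; omega

-- the `for symbol in in_str` loop of A; state (s, l, i, out_str) as in A.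
-- `out_str += in_str[i]`: i is always a valid index here (it counts the consumed
-- characters, so in_str[i] is exactly `symbol`); the getD default is never used.
def pvLoopA (in_l : List Char) : List Char → Int → Int → Int → List Char → List Char
  | [], _s, _l, _i, out => out
  | c :: cs, s, l, i, out =>
    if l ≤ 3 then
      let s₁ := if s ≤ 19 ∧ c ≠ '\n' then s + 1 else s
      let out₁ := if s ≤ 19 ∧ c ≠ '\n' then out ++ [(PySem.List.pyGet? in_l i).getD c] else out
      let i₁ := i + 1
      if c = '\n' then
        pvLoopA in_l cs 0 (l + 1) i₁ (pvPadLine s₁ out₁).2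
      else
        pvLoopA in_l cs s₁ l i₁ out₁
    else
      pvLoopA in_l cs s l i out

def strFit_4x20 (in_str : String) : String :=
  String.ofList (pvPadTo80 (pvLoopA in_str.toList in_str.toList 0 0 0 []))

-- ===== PORT B =====
-- seg[:20].ljust(20): truncate to 20 columns and right-pad with spaces (ljust hand-ported: t + ' ' * (20 - len(t)))
def pvLjust20 (seg : List Char) : List Char :=
  let t := PySem.List.slice seg none (some 20)
  t ++ List.replicate (20 - t.length) ' '

-- .ljust(80) on the joined buffer, hand-ported the same way
def pvLjust80 (t : List Char) : List Char :=
  t ++ List.replicate (80 - t.length) ' '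

-- ''.join(seg[:20].ljust(20) for seg in in_str.split('\n')[:4]).ljust(80)
def strFit_4x20_alt (in_str : String) : String :=
  String.ofList (pvLjust80
    ((PySem.List.slice (PySem.Chars.splitOn in_str.toList ['\n']) none (some 4)).flatMap pvLjust20))

-- ===== PRECONDITION & SPEC =====
def Spec_strFit_4x20 (in_str : String) (out : String) : Prop := out = strFit_4x20_alt in_str
instance (in_str : String) (out : String) : Decidable (Spec_strFit_4x20 in_str out) := by unfold Spec_strFit_4x20; infer_instance

-- ===== CLAIM (what is proved, stated in full; the proofs are below) =====
def Claim_equal_strFit_4x20 : Prop := ∀ (in_str : String), Dom_strFit_4x20 in_str → Spec_strFit_4x20 in_str (strFit_4x20 in_str)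

-- ===== LEMMAS AND PROOFS =====

-- evaluated forms of the two literal slices xs[:20] and xs[:4]
theorem pvSlice20 (xs : List Char) : PySem.List.slice xs none (some 20) = xs.take 20 := by
  rw [PySem.List.slice_to xs (b := 20) (by norm_num)]
  rfl

theorem pvSlice4 (xs : List (List Char)) : PySem.List.slice xs none (some 4) = xs.take 4 := by
  rw [PySem.List.slice_to xs (b := 4) (by norm_num)]
  rfl

-- a simple structural splitter on '\n', used only as a proof-side bridge
def pvSplit : List Char → List (List Char)
  | [] => [[]]
  | c :: rest =>
    if c = '\n' then [] :: pvSplit rest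
    else
      match pvSplit rest with
      | s :: ss => (c :: s) :: ss
      | [] => [[c]]

-- the first element surviving dropWhile fails the predicate
theorem pvDropWhile_head_false {p : Char → Bool} (cs : List Char) (d : Char) (rest : List Char)
    (h : cs.dropWhile p = d :: rest) : p d = false := by
  induction cs with
  | nil => simp at h
  | cons c cs ih =>
    rw [List.dropWhile_cons] at h
    split at h
    · exact ih h
    · next hp =>
      injection h with h1 _
      subst h1
      simpa using hp

theorem pvSplit_ne_nil (l : List Char) : pvSplit l ≠ [] := by
  cases l with
  | nil => simp [pvSplit]
  | cons c rest =>
    simp only [pvSplit]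
    split
    · simp
    · split <;> simp

-- prefix-absorbing view of splitOn.go
def pvConsHead (pre : List Char) : List (List Char) → List (List Char)
  | [] => [pre]
  | s :: ss => (pre ++ s) :: ss

theorem pvGo_spec (fuel : Nat) (l cur : List Char) (acc : List (List Char))
    (hf : l.length < fuel) :
    PySem.Chars.splitOn.go ['\n'] fuel l cur acc
      = acc.reverse ++ pvConsHead cur.reverse (pvSplit l) := by
  induction fuel generalizing l cur acc with
  | zero => omega
  | succ fuel ih =>
    cases l with
    | nil =>
      simp [PySem.Chars.splitOn.go, pvSplit, pvConsHead]
    | cons c rest =>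
      have hf' : rest.length < fuel := by
        simp only [List.length_cons] at hf; omega
      obtain ⟨s, ss, hss⟩ : ∃ s ss, pvSplit rest = s :: ss := by
        cases h : pvSplit rest with
        | nil => exact absurd h (pvSplit_ne_nil rest)
        | cons s ss => exact ⟨s, ss, rfl⟩
      by_cases hc : c = '\n'
      · subst hc
        have hpre : List.isPrefixOf ['\n'] ('\n' :: rest) = true := by
          simp [List.isPrefixOf]
        rw [show PySem.Chars.splitOn.go ['\n'] (fuel + 1) ('\n' :: rest) cur acc
              = PySem.Chars.splitOn.go ['\n'] fuel (List.drop 1 ('\n' :: rest)) [] (cur.reverse :: acc) by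
              simp [PySem.Chars.splitOn.go, hpre]]
        rw [ih _ _ _ (by simpa using hf')]
        simp [pvSplit, hss, pvConsHead]
      · have hpre : List.isPrefixOf ['\n'] (c :: rest) = false := by
          simp only [List.isPrefixOf, Bool.and_true]
          exact beq_eq_false_iff_ne.mpr (Ne.symm hc)
        rw [show PySem.Chars.splitOn.go ['\n'] (fuel + 1) (c :: rest) cur acc
              = PySem.Chars.splitOn.go ['\n'] fuel rest (c :: cur) acc by
              simp [PySem.Chars.splitOn.go, hpre]]
        rw [ih _ _ _ hf']
        simp [pvSplit, hc, hss, pvConsHead]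

theorem pvSplitOn_eq (l : List Char) : PySem.Chars.splitOn l ['\n'] = pvSplit l := by
  rw [PySem.Chars.splitOn, pvGo_spec _ _ _ _ (by omega)]
  obtain ⟨s, ss, hss⟩ : ∃ s ss, pvSplit l = s :: ss := by
    cases h : pvSplit l with
    | nil => exact absurd h (pvSplit_ne_nil l)
    | cons s ss => exact ⟨s, ss, rfl⟩
  simp [hss, pvConsHead]

theorem pvSplit_no_nl (l : List Char) (h : '\n' ∉ l) : pvSplit l = [l] := by
  induction l with
  | nil => rfl
  | cons c rest ih =>
    have hc : c ≠ '\n' := fun hc => h (hc ▸ List.mem_cons_self)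
    have := ih (fun hm => h (List.mem_cons_of_mem _ hm))
    simp [pvSplit, hc, this]

theorem pvSplit_first (seg rest : List Char) (h : '\n' ∉ seg) :
    pvSplit (seg ++ '\n' :: rest) = seg :: pvSplit rest := by
  induction seg with
  | nil => simp [pvSplit]
  | cons c s ih =>
    have hc : c ≠ '\n' := fun hc => h (hc ▸ List.mem_cons_self)
    have := ih (fun hm => h (List.mem_cons_of_mem _ hm))
    simp [pvSplit, hc, this]

theorem pvPadLine_snd (s : Int) (out : List Char) :
    (pvPadLine s out).2 = out ++ List.replicate (20 - s).toNat ' ' := by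
  unfold pvPadLine
  split
  · rw [pvPadLine_snd (s + 1)]
    have h : (20 - s).toNat = (20 - (s + 1)).toNat + 1 := by omega
    rw [h, List.replicate_succ]
    simp
  · have h : (20 - s).toNat = 0 := by omega
    simp [h]
  termination_by (20 - s).toNat
  decreasing_by omega

theorem pvPadTo80_eq (out : List Char) :
    pvPadTo80 out = out ++ List.replicate (80 - out.length) ' ' := by
  unfold pvPadTo80
  split
  · rw [pvPadTo80_eq (out ++ [' '])]
    have h : 80 - out.length = (80 - (out ++ [' ']).length) + 1 := by
      simp only [List.length_append, List.length_cons, List.length_nil]; omega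
    rw [h, List.replicate_succ]
    simp
  · have h : 80 - out.length = 0 := by omega
    simp [h]
  termination_by 80 - out.length
  decreasing_by simp only [List.length_append, List.length_cons, List.length_nil]; omega

theorem pvLoopA_stop (in_l cs : List Char) (s l i : Int) (out : List Char) (h : 3 < l) :
    pvLoopA in_l cs s l i out = out := by
  induction cs with
  | nil => rfl
  | cons c cs ih => simp only [pvLoopA, if_neg (by omega : ¬ l ≤ 3)]; exact ih

theorem pvLoopA_newline (in_l cs : List Char) (s l i : Int) (out : List Char) (hl : l ≤ 3) :
    pvLoopA in_l ('\n' :: cs) s l i out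
      = pvLoopA in_l cs 0 (l + 1) (i + 1) (out ++ List.replicate (20 - s).toNat ' ') := by
  simp only [pvLoopA, if_pos hl]
  simp [pvPadLine_snd]

theorem pvLoopA_seg (in_l : List Char) (cs rest : List Char) (s l i : Int) (out : List Char)
    (hnl : '\n' ∉ cs) (hl : l ≤ 3) (hs0 : 0 ≤ s) (hs20 : s ≤ 20) (hi : 0 ≤ i)
    (hd : List.drop i.toNat in_l = cs ++ rest) :
    pvLoopA in_l (cs ++ rest) s l i out
      = pvLoopA in_l rest (min 20 (s + cs.length)) l (i + cs.length)
          (out ++ cs.take (20 - s).toNat) := by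
  induction cs generalizing s i out with
  | nil =>
    simp only [List.nil_append, List.take_nil, List.append_nil, List.length_nil,
      Nat.cast_zero, add_zero, min_eq_right hs20]
  | cons c cs ih =>
    have hc : c ≠ '\n' := fun h => hnl (h ▸ List.mem_cons_self)
    have hnl' : '\n' ∉ cs := fun hm => hnl (List.mem_cons_of_mem _ hm)
    have hpg : PySem.List.pyGet? in_l i = some c := by
      have h0 : in_l[i.toNat]? = some c := by
        have := List.getElem?_drop (xs := in_l) (i := i.toNat) (j := 0)
        rw [hd] at this
        simpa using this.symm
      have hh := PySem.List.pyGet?_natCast (xs := in_l) (n := i.toNat)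
      rw [Int.toNat_of_nonneg hi] at hh
      rw [hh]
      exact h0
    have hd' : List.drop (i + 1).toNat in_l = cs ++ rest := by
      have h1 : (i + 1).toNat = i.toNat + 1 := by omega
      have h2 := congrArg (List.drop 1) hd
      rw [List.drop_drop] at h2
      rw [h1]
      simpa using h2
    by_cases hs : s ≤ 19
    · have hcond : s ≤ 19 ∧ c ≠ '\n' := ⟨hs, hc⟩
      simp only [List.cons_append, pvLoopA, if_pos hl, if_pos hcond, if_neg hc, hpg,
        Option.getD_some]
      rw [ih (s + 1) (i + 1) _ hnl' (by omega) (by omega) (by omega) hd']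
      have h1 : min 20 (s + 1 + (cs.length : Int)) = min 20 (s + ((c :: cs).length : Int)) := by
        simp only [List.length_cons]; push_cast; ring_nf
      have h2 : i + 1 + (cs.length : Int) = i + ((c :: cs).length : Int) := by
        simp only [List.length_cons]; push_cast; ring
      have h3 : out ++ [c] ++ cs.take (20 - (s + 1)).toNat = out ++ (c :: cs).take (20 - s).toNat := by
        have h : (20 - s).toNat = (20 - (s + 1)).toNat + 1 := by omega
        rw [h, List.take_succ_cons, List.append_assoc]
        rfl
      rw [h1, h2, h3]
    · have hcond : ¬ (s ≤ 19 ∧ c ≠ '\n') := by simp [hs]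
      simp only [List.cons_append, pvLoopA, if_pos hl, if_neg hcond, if_neg hc]
      rw [ih s (i + 1) _ hnl' hs0 hs20 (by omega) hd']
      have h1 : min 20 (s + (cs.length : Int)) = min 20 (s + ((c :: cs).length : Int)) := by
        omega
      have h2 : i + 1 + (cs.length : Int) = i + ((c :: cs).length : Int) := by
        simp only [List.length_cons]; push_cast; ring
      have h3 : (20 - s).toNat = 0 := by omega
      rw [h2, ← h1]
      simp [h3]

-- every formatted line is exactly 20 characters
theorem pvLjust20_length (seg : List Char) : (pvLjust20 seg).length = 20 := by
  simp only [pvLjust20, pvSlice20, List.length_append, List.length_replicate, List.length_take]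
  omega

theorem pvFlatMap_length (xs : List (List Char)) :
    (xs.flatMap pvLjust20).length = 20 * xs.length := by
  induction xs with
  | nil => simp
  | cons x xs ih =>
    simp only [List.flatMap_cons, List.length_append, pvLjust20_length, ih, List.length_cons]
    ring

-- the main invariant: starting a fresh line (s = 0) at line counter l and input
-- position i, A's loop appends exactly B's formatting of the remaining segments,
-- except possibly lacking trailing spaces (k of them).
theorem pvMain (in_l : List Char) (cs : List Char) (l i : Int) (out : List Char)
    (hl0 : 0 ≤ l) (hl4 : l ≤ 4) (hi : 0 ≤ i) (hd : List.drop i.toNat in_l = cs) :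
    ∃ k : Nat,
      out ++ ((pvSplit cs).take (4 - l).toNat).flatMap pvLjust20
        = pvLoopA in_l cs 0 l i out ++ List.replicate k ' ' := by
  by_cases hl3 : l ≤ 3
  · by_cases hmem : '\n' ∈ cs
    · -- split off the first line: cs = seg ++ '\n' :: rest with '\n' ∉ seg
      set seg := cs.takeWhile (fun c => c != '\n') with hseg
      have hdw : cs.dropWhile (fun c => c != '\n') ≠ [] := by
        intro hnil
        have hta := List.takeWhile_append_dropWhile (p := fun c => c != '\n') (l := cs)
        rw [hnil, List.append_nil] at hta
        rw [← hta] at hmem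
        have := List.mem_takeWhile_imp hmem
        simp at this
      obtain ⟨d, rest, hdr⟩ : ∃ d rest, cs.dropWhile (fun c => c != '\n') = d :: rest := by
        cases h : cs.dropWhile (fun c => c != '\n') with
        | nil => exact absurd h hdw
        | cons d rest => exact ⟨d, rest, rfl⟩
      have hdnl : d = '\n' := by
        have := pvDropWhile_head_false cs d rest hdr
        simpa using this
      have hdr' : cs.dropWhile (fun c => c != '\n') = '\n' :: rest := by
        rw [hdr, hdnl]
      have hcs : cs = seg ++ '\n' :: rest := by
        rw [hseg, ← hdr', List.takeWhile_append_dropWhile]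
      have hsegnl : '\n' ∉ seg := by
        intro hm
        have := List.mem_takeWhile_imp hm
        simp at this
      -- A's loop across the line and its newline
      have hstep :
          pvLoopA in_l cs 0 l i out
            = pvLoopA in_l rest 0 (l + 1) (i + seg.length + 1)
                (out ++ pvLjust20 seg) := by
        rw [hcs, pvLoopA_seg in_l seg ('\n' :: rest) 0 l i out hsegnl hl3
              le_rfl (by norm_num) hi (by rw [hd, hcs]),
            pvLoopA_newline _ _ _ _ _ _ hl3]
        have e1 : ((20:Int) - 0).toNat = 20 := by decide
        have e2 : ((20:Int) - min 20 (0 + (seg.length:Int))).toNat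
            = 20 - (seg.take 20).length := by
          simp only [List.length_take]; omega
        rw [e1, e2]
        simp only [pvLjust20, pvSlice20, List.append_assoc]
      have hd' : List.drop (i + seg.length + 1).toNat in_l = rest := by
        have h1 : (i + (seg.length : Int) + 1).toNat = i.toNat + (seg.length + 1) := by omega
        have h2 := congrArg (List.drop (seg.length + 1)) hd
        rw [List.drop_drop] at h2
        have h3 : List.drop (seg.length + 1) cs = rest := by
          rw [hcs, show seg ++ '\n' :: rest = (seg ++ ['\n']) ++ rest by simp,
              show seg.length + 1 = (seg ++ ['\n']).length by simp]
          exact List.drop_left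
        rw [h1, h2]
        exact h3
      obtain ⟨k, hk⟩ := pvMain in_l rest (l + 1) (i + seg.length + 1)
        (out ++ pvLjust20 seg) (by omega) (by omega) (by omega) hd'
      refine ⟨k, ?_⟩
      rw [hstep, ← hk, hcs, pvSplit_first seg rest hsegnl]
      have hn : (4 - l).toNat = ((4 - (l + 1)).toNat) + 1 := by omega
      rw [hn, List.take_succ_cons, List.flatMap_cons, ← List.append_assoc]
    · -- last (unterminated) line: loop writes the truncation, B also pads it
      have hsp : pvSplit cs = [cs] := pvSplit_no_nl cs hmem
      have htake : (pvSplit cs).take (4 - l).toNat = [cs] := by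
        rw [hsp]
        cases h : (4 - l).toNat with
        | zero => omega
        | succ n => simp
      have hloop : pvLoopA in_l cs 0 l i out = out ++ cs.take 20 := by
        have h := pvLoopA_seg in_l cs [] 0 l i out hmem hl3 le_rfl (by norm_num) hi
          (by simpa using hd)
        simp only [List.append_nil] at h
        rw [h]
        show pvLoopA in_l [] _ _ _ _ = _
        rfl
      refine ⟨20 - (cs.take 20).length, ?_⟩
      rw [htake, hloop, List.flatMap_cons]
      simp only [pvLjust20, pvSlice20, List.flatMap_nil, List.append_nil, List.append_assoc]
  · -- l = 4: the loop ignores the rest, and B keeps no more segments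
    have hl : l = 4 := by omega
    refine ⟨0, ?_⟩
    rw [pvLoopA_stop in_l cs 0 l i out (by omega)]
    simp [hl]
  termination_by cs.length
  decreasing_by
    rw [hcs]; simp only [List.length_append, List.length_cons]; omega

-- ===== VERDICT (by name: the statement is the Claim_ definition above) =====
theorem strFit_4x20_spec : Claim_equal_strFit_4x20 := by
  intro in_str _hdom
  show strFit_4x20 in_str = strFit_4x20_alt in_str
  obtain ⟨k, hk⟩ := pvMain in_str.toList in_str.toList 0 0 []
    (by norm_num) (by norm_num) (by norm_num) (by simp)
  simp only [List.nil_append, show ((4:Int) - 0).toNat = 4 from by decide] at hk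
  have hslice : PySem.List.slice (PySem.Chars.splitOn in_str.toList ['\n']) none (some 4)
      = (pvSplit in_str.toList).take 4 := by
    rw [pvSplitOn_eq, pvSlice4]
  have hJlen : (((pvSplit in_str.toList).take 4).flatMap pvLjust20).length ≤ 80 := by
    rw [pvFlatMap_length]
    have h4 := List.length_take_le 4 (pvSplit in_str.toList)
    omega
  have hOk : (pvLoopA in_str.toList in_str.toList 0 0 0 []).length + k ≤ 80 := by
    have hlen := congrArg List.length hk
    simp only [List.length_append, List.length_replicate] at hlen
    omega
  have hcount : 80 - (pvLoopA in_str.toList in_str.toList 0 0 0 []).length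
      = k + (80 - ((pvLoopA in_str.toList in_str.toList 0 0 0 []) ++ List.replicate k ' ').length) := by
    simp only [List.length_append, List.length_replicate]
    omega
  unfold strFit_4x20 strFit_4x20_alt pvLjust80
  rw [pvPadTo80_eq, hslice, hk]
  refine congrArg String.ofList ?_
  rw [List.append_assoc, ← List.replicate_add, ← hcount]
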